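-- pv_equiv track=rewrite | github.com/jake-albert/py-algs | c16/c16p16.py | get_left_index_2
-- ===== SOURCE A (Python) =====
-- def get_left_index_2(lst):
--     """Returns the leftmost index in an array whose value is greater
--     than some value to the right.
--
--     Args:
--         lst: A list of integers.
--
--     Returns:
--         An integer index, or the None object if no index with the
--         desired property exists.
--     """
--     minimum = float("inf")
--     left = len(lst) - 1
--
--     # Update minimum only after checking current index's value against
--     # the running minimum.
--
--     for i in range(len(lst)-1,-1,-1):
--         if lst[i] > minimum:
--             left = i
--         if lst[i] < minimum:
--             minimum = lst[i]
--
--     return None if left == len(lst) - 1 else left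
-- ===== SOURCE B (Python) =====
-- def get_left_index_2(lst):
--     """Suffix-minimum table built right-to-left, then a forward scan
--     for the first index whose value exceeds the minimum to its right."""
--     n = len(lst)
--     suf = [None] * n
--     m = None
--     for i in range(n - 1, 0, -1):
--         if m is None or lst[i] < m:
--             m = lst[i]
--         suf[i - 1] = m
--     for i in range(n):
--         if suf[i] is not None and lst[i] > suf[i]:
--             return i
--     return None
-- ===== Notes on version B (the rewrite author's own statement) =====
-- stated objective: alternative
-- what changed: Replaces A's single fused reverse scan (running minimum + best index updated together) with two separated passes: a right-to-left pass building an explicit suffix-minimum table, then a left-to-right scan returning the first index whose value exceeds its suffix minimum.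
import Mathlib
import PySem

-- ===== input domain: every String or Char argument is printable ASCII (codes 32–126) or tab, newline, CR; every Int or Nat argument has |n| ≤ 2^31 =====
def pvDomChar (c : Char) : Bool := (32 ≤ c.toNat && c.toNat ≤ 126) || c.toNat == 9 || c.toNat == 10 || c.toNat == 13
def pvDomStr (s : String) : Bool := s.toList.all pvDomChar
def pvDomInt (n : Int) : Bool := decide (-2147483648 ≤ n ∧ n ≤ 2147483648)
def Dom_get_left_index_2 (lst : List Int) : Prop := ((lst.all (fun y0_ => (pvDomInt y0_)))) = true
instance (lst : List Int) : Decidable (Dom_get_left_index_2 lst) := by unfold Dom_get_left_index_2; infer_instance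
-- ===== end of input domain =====

-- B replaces A's fused reverse scan by an explicit suffix-minimum table plus a forward scan
-- (alternative decomposition, same O(n) cost).

-- ===== PORT A =====
-- A's loop body: `none` for `minimum` stands for float("inf") (nothing is > inf, everything is < inf).
-- lst[i] is read with PySem.List.pyGet? (the index is always in range inside the loop).
def stepA (lst : List Int) (st : Option Int × Int) (i : Nat) : Option Int × Int :=
  let v := (PySem.List.pyGet? lst (i : Int)).getD 0
  let left := if (match st.1 with | none => false | some m => v > m) then (i : Int) else st.2
  let minimum := if (match st.1 with | none => true | some m => v < m) then some v else st.1
  (minimum, left)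

-- the `for i in range(len(lst)-1, -1, -1)` loop: processes i = k-1, k-2, …, 0
def loopA (lst : List Int) : Nat → Option Int × Int → Option Int × Int
  | 0, st => st
  | k+1, st => loopA lst k (stepA lst st k)

def get_left_index_2 (lst : List Int) : Option Int :=
  let n := lst.length
  let st := loopA lst n (none, (n : Int) - 1)
  if st.2 = (n : Int) - 1 then none else some st.2

-- ===== PORT B =====
-- suffix-minimum table, built right-to-left as in Source B: (sufMinB xs).1 is the table suf
-- (suf[i] = min of xs[i+1:], none for the last slot), (sufMinB xs).2 is the running minimum m.
def sufMinB : List Int → List (Option Int) × Option Int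
  | [] => ([], none)
  | x :: xs =>
    let p := sufMinB xs
    (p.2 :: p.1, some (match p.2 with | none => x | some v => if x < v then x else v))

-- forward scan: first index i with suf[i] not None and lst[i] > suf[i]
def scanB : List Int → List (Option Int) → Int → Option Int
  | x :: xs, m :: ss, i =>
    (match m with
     | some v => if x > v then some i else scanB xs ss (i + 1)
     | none => scanB xs ss (i + 1))
  | _, _, _ => none

def get_left_index_2_alt (lst : List Int) : Option Int :=
  scanB lst (sufMinB lst).1 0

-- ===== PRECONDITION & SPEC =====
def Spec_get_left_index_2 (lst : List Int) (out : Option Int) : Prop := out = get_left_index_2_alt lst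
instance (lst : List Int) (out : Option Int) : Decidable (Spec_get_left_index_2 lst out) := by unfold Spec_get_left_index_2; infer_instance

-- ===== CLAIM (what is proved, stated in full; the proofs are below) =====
def Claim_equal_get_left_index_2 : Prop := ∀ (lst : List Int), Dom_get_left_index_2 lst → Spec_get_left_index_2 lst (get_left_index_2 lst)

-- ===== LEMMAS AND PROOFS =====

-- the minimum of a list exactly as both loops compute it (none = empty list)
def minv : List Int → Option Int
  | [] => none
  | x :: xs => some (match minv xs with | none => x | some v => if x < v then x else v)

theorem sufMinB_snd (xs : List Int) : (sufMinB xs).2 = minv xs := by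
  induction xs with
  | nil => rfl
  | cons x xs ih => simp [sufMinB, minv, ih]

theorem minv_eq_none_iff (xs : List Int) : minv xs = none ↔ xs = [] := by
  cases xs <;> simp [minv]

-- one step of A's loop on (x :: xs) at index i+1 is the step on xs at index i, left shifted by one
theorem stepA_shift (x : Int) (xs : List Int) (m : Option Int) (l : Int) (i : Nat) :
    stepA (x :: xs) (m, l) (i + 1) = ((stepA xs (m, l - 1) i).1, (stepA xs (m, l - 1) i).2 + 1) := by
  have hget : PySem.List.pyGet? (x :: xs) ((i + 1 : Nat) : Int) = PySem.List.pyGet? xs ((i : Nat) : Int) := by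
    simp [PySem.List.pyGet?_natCast]
  cases m <;>
    simp only [stepA, hget, Prod.mk.injEq] <;>
    split_ifs <;> refine ⟨by trivial, ?_⟩ <;>
    first
    | rw [sub_add_cancel]
    | (push_cast; ring)

-- A's whole loop on (x :: xs) is the loop on xs (with the left slot shifted) followed by index 0
theorem loopA_shift (x : Int) (xs : List Int) (k : Nat) :
    ∀ (m : Option Int) (l : Int),
    loopA (x :: xs) (k + 1) (m, l) =
      stepA (x :: xs) ((loopA xs k (m, l - 1)).1, (loopA xs k (m, l - 1)).2 + 1) 0 := by
  induction k with
  | zero =>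
    intro m l
    simp [loopA, sub_add_cancel]
  | succ k ih =>
    intro m l
    show loopA (x :: xs) (k + 1) (stepA (x :: xs) (m, l) (k + 1)) = _
    rw [stepA_shift]
    rw [ih]
    simp only [add_sub_cancel_right]
    rfl

-- the minimum component of A's full loop is minv
theorem loopA_min (xs : List Int) : ∀ l, (loopA xs xs.length (none, l)).1 = minv xs := by
  induction xs with
  | nil => intro l; rfl
  | cons x xs ih =>
    intro l
    rw [List.length_cons, loopA_shift, ih]
    cases h : minv xs with
    | none => simp [stepA, minv, h]
    | some v =>
      by_cases hx : x < v <;> simp [stepA, minv, h, hx]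

-- the raw `left` value of A's loop
def Araw (lst : List Int) : Int := (loopA lst lst.length (none, (lst.length : Int) - 1)).2

theorem Araw_cons (x : Int) (xs : List Int) :
    Araw (x :: xs) =
      if (match minv xs with | none => false | some v => x > v) then 0 else Araw xs + 1 := by
  have hinit : (((x :: xs).length : Int)) - 1 = ((xs.length : Int) - 1) + 1 := by
    push_cast [List.length_cons]; ring
  show (loopA (x :: xs) (xs.length + 1) (none, ((x :: xs).length : Int) - 1)).2 = _
  rw [hinit, loopA_shift, add_sub_cancel_right, loopA_min]
  cases h : minv xs with
  | none => simp [stepA, Araw]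
  | some v =>
    by_cases hx : x > v <;> simp [stepA, Araw, hx]


theorem Araw_cons_none (x : Int) (xs : List Int) (h : minv xs = none) :
    Araw (x :: xs) = Araw xs + 1 := by
  rw [Araw_cons, h]
  simp

theorem Araw_cons_some (x v : Int) (xs : List Int) (h : minv xs = some v) :
    Araw (x :: xs) = if x > v then 0 else Araw xs + 1 := by
  rw [Araw_cons, h]
  by_cases hx : x > v <;> simp [hx]

theorem A_eq_Araw (lst : List Int) :
    get_left_index_2 lst = if Araw lst = (lst.length : Int) - 1 then none else some (Araw lst) := by
  rfl

theorem scanB_shift (xs : List Int) : ∀ (ss : List (Option Int)) (i : Int),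
    scanB xs ss (i + 1) = (scanB xs ss i).map (· + 1) := by
  induction xs with
  | nil => intro ss i; cases ss <;> rfl
  | cons x xs ih =>
    intro ss i
    cases ss with
    | nil => rfl
    | cons m ss =>
      cases m with
      | none => simp [scanB, ih]
      | some v =>
        by_cases h : x > v <;> simp [scanB, h, ih]

theorem B_cons (x : Int) (xs : List Int) :
    get_left_index_2_alt (x :: xs) =
      (match minv xs with
       | some v => if x > v then some 0 else (get_left_index_2_alt xs).map (· + 1)
       | none => (get_left_index_2_alt xs).map (· + 1)) := by
  show scanB (x :: xs) ((sufMinB xs).2 :: (sufMinB xs).1) 0 = _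
  rw [sufMinB_snd]
  cases h : minv xs with
  | none =>
    show scanB xs (sufMinB xs).1 (0 + 1) = _
    rw [scanB_shift]
    rfl
  | some v =>
    by_cases hx : x > v
    · simp [scanB, hx]
    · show (if x > v then some 0 else scanB xs (sufMinB xs).1 (0 + 1)) = _
      rw [if_neg hx, scanB_shift]
      simp [hx, get_left_index_2_alt]

theorem B_cons_none (x : Int) (xs : List Int) (h : minv xs = none) :
    get_left_index_2_alt (x :: xs) = (get_left_index_2_alt xs).map (· + 1) := by
  rw [B_cons, h]

theorem B_cons_some (x v : Int) (xs : List Int) (h : minv xs = some v) :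
    get_left_index_2_alt (x :: xs) =
      if x > v then some 0 else (get_left_index_2_alt xs).map (· + 1) := by
  rw [B_cons, h]

theorem main_eq : ∀ lst : List Int, get_left_index_2 lst = get_left_index_2_alt lst := by
  intro lst
  induction lst with
  | nil => rfl
  | cons x xs ih =>
    cases h : minv xs with
    | none =>
      have hxs : xs = [] := (minv_eq_none_iff xs).1 h
      subst hxs
      rw [A_eq_Araw, Araw_cons_none x [] h, B_cons_none x [] h]
      simp [Araw, loopA, get_left_index_2_alt, scanB]
    | some v =>
      have hne : xs ≠ [] := by
        intro he; subst he; simp [minv] at h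
      have hlen : 0 < xs.length := List.length_pos_iff.mpr hne
      rw [A_eq_Araw, Araw_cons_some x v xs h, B_cons_some x v xs h]
      by_cases hx : x > v
      · rw [if_pos hx, if_pos hx]
        rw [if_neg (by simp [List.length_cons]; omega)]
      · rw [if_neg hx, if_neg hx]
        rw [← ih, A_eq_Araw]
        by_cases hc : Araw xs = (xs.length : Int) - 1
        · rw [if_pos hc, if_pos (by simp [List.length_cons]; omega)]
          rfl
        · rw [if_neg hc, if_neg (by simp [List.length_cons]; omega)]
          rfl

-- ===== VERDICT (by name: the statement is the Claim_ definition above) =====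
theorem get_left_index_2_spec : Claim_equal_get_left_index_2 := by
  intro lst _
  show get_left_index_2 lst = get_left_index_2_alt lst
  exact main_eq lst
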